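-- pv_equiv track=rewrite | github.com/zhanghaok/BERT-MRC-NER | eval.py | mrc_decode
-- ===== SOURCE A (Python) =====
-- def mrc_decode(start_pred,end_pred,raw_text):
--     pred_entities = []
--     for i,s_type in enumerate(start_pred):
--         if s_type == 0:
--             continue
--         for j,e_type in enumerate(end_pred[i:]):
--             if s_type == e_type:#找离start最近的一个span，所以下面有break语句
--                 tmp_ent = raw_text[i:i+j+1]
--                 pred_entities.append(tmp_ent)
--                 break
--
--     return pred_entities
-- ===== SOURCE B (Python) =====
-- def mrc_decode(start_pred, end_pred, raw_text):
--     n = len(start_pred)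
--     m = len(end_pred)
--     nearest = {}
--     found = []
--     for i in range(max(n, m) - 1, -1, -1):
--         if i < m:
--             nearest[end_pred[i]] = i
--         if i < n:
--             s = start_pred[i]
--             if s != 0 and s in nearest:
--                 found.append(raw_text[i:nearest[s] + 1])
--     found.reverse()
--     return found
-- ===== Notes on version B (the rewrite author's own statement) =====
-- stated objective: faster
-- what changed: replaced the per-start rightward rescan of end_pred by a single right-to-left sweep that maintains a dict mapping each entity type to its nearest end position at or after the current index
import Mathlib
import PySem

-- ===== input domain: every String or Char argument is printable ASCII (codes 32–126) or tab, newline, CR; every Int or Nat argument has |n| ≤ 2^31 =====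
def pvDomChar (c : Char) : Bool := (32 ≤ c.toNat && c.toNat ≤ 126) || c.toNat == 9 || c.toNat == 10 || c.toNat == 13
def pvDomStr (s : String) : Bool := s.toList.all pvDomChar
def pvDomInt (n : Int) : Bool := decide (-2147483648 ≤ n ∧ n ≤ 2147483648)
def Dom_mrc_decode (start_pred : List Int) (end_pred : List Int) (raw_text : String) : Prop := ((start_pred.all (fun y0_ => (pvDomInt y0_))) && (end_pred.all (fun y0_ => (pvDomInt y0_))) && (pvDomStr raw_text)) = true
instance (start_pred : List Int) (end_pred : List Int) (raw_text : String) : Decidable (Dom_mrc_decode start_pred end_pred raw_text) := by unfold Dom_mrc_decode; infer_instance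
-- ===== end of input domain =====

-- B replaces A's per-start rightward rescan of end_pred by one right-to-left sweep keeping a
-- dict type -> nearest end index at or after the current position (objective: faster, O(n*m) -> O(n+m)).

-- ===== PORT A =====
-- inner 'for j,e_type in enumerate(end_pred[i:]): if s_type == e_type: …; break' — first match wins
def mrcFindBreak (s : Int) : List (Int × Int) → Option Int
  | [] => none
  | (j, e) :: rest => if s == e then some j else mrcFindBreak s rest

def mrc_decode (start_pred : List Int) (end_pred : List Int) (raw_text : String) : List String :=
  (PySem.List.enumerate start_pred).foldl (fun pred_entities p =>
    if p.2 == (0 : Int) then pred_entities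
    else
      match mrcFindBreak p.2 (PySem.List.enumerate (PySem.List.slice end_pred (some p.1) none)) with
      | some j => pred_entities ++ [PySem.Str.slice raw_text (some p.1) (some (p.1 + j + 1))]
      | none => pred_entities) []

-- ===== PORT B =====
def mrc_decode_alt (start_pred : List Int) (end_pred : List Int) (raw_text : String) : List String :=
  let n : Int := PySem.List.len start_pred
  let m : Int := PySem.List.len end_pred
  let st := (PySem.List.pyRange (max n m - 1) (-1) (-1)).foldl
    (fun st i =>
      let st := if i < m then (st.1.insert (PySem.List.pyGetD end_pred i 0) i, st.2) else st
      if i < n then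
        let s := PySem.List.pyGetD start_pred i 0
        if s != 0 && st.1.contains s then
          (st.1, st.2 ++ [PySem.Str.slice raw_text (some i) (some (st.1.getD s 0 + 1))])
        else st
      else st)
    ((PySem.Dict.empty : PySem.Dict Int Int), ([] : List String))
  st.2.reverse

-- ===== PRECONDITION & SPEC =====
def Spec_mrc_decode (start_pred : List Int) (end_pred : List Int) (raw_text : String) (out : List String) : Prop := out = mrc_decode_alt start_pred end_pred raw_text
instance (start_pred : List Int) (end_pred : List Int) (raw_text : String) (out : List String) : Decidable (Spec_mrc_decode start_pred end_pred raw_text out) := by unfold Spec_mrc_decode; infer_instance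

-- ===== CLAIM (what is proved, stated in full; the proofs are below) =====
def Claim_equal_mrc_decode : Prop := ∀ (start_pred : List Int) (end_pred : List Int) (raw_text : String), Dom_mrc_decode start_pred end_pred raw_text → Spec_mrc_decode start_pred end_pred raw_text (mrc_decode start_pred end_pred raw_text)

-- ===== LEMMAS AND PROOFS =====

-- first index (from the front) of s in a list, if any
def ffind (s : Int) : List Int → Option Nat
  | [] => none
  | e :: rest => if s = e then some 0 else (ffind s rest).map (· + 1)

-- what both programs emit for start position k holding type s
def emitE (ep : List Int) (txt : String) (k : Nat) (s : Int) : List String :=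
  if s = 0 then [] else
    match ffind s (ep.drop k) with
    | some j => [PySem.Str.slice txt (some (k : Int)) (some ((k : Int) + (j : Int) + 1))]
    | none => []

-- A's output, structurally
def specList (ep : List Int) (txt : String) : List Int → Nat → List String
  | [], _ => []
  | s :: rest, k => emitE ep txt k s ++ specList ep txt rest (k + 1)

-- what B emits at index k (guarded by k < n)
def emitB (sp ep : List Int) (txt : String) (k : Nat) : List String :=
  if (k : Int) < sp.length then emitE ep txt k (sp.getD k 0) else []

lemma mrcFindBreak_enumerate (s : Int) : ∀ (xs : List Int) (j0 : Int),
    mrcFindBreak s (PySem.List.enumerate xs j0) = (ffind s xs).map (fun j => j0 + (j : Int)) := by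
  intro xs
  induction xs with
  | nil => intro j0; simp [PySem.List.enumerate_nil, mrcFindBreak, ffind]
  | cons e rest ih =>
    intro j0
    simp only [PySem.List.enumerate_cons, mrcFindBreak, ffind]
    by_cases h : s = e
    · simp [h]
    · simp only [beq_iff_eq, if_neg h, ih (j0 + 1)]
      cases hf : ffind s rest with
      | none => simp
      | some j => simp; ring

lemma aStep (ep : List Int) (txt : String) (acc : List String) (k0 : Nat) (s : Int) :
    (if s == (0 : Int) then acc
     else
       match mrcFindBreak s (PySem.List.enumerate (PySem.List.slice ep (some ((k0 : Nat) : Int)) none)) with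
       | some j => acc ++ [PySem.Str.slice txt (some ((k0 : Nat) : Int)) (some (((k0 : Nat) : Int) + j + 1))]
       | none => acc)
    = acc ++ emitE ep txt k0 s := by
  rw [PySem.List.slice_from_natCast, mrcFindBreak_enumerate]
  unfold emitE
  by_cases h0 : s = 0
  · simp [h0]
  · simp only [beq_iff_eq, if_neg h0]
    cases hf : ffind s (List.drop k0 ep) with
    | none => simp
    | some j => simp

lemma aFold (ep : List Int) (txt : String) : ∀ (l : List Int) (k0 : Nat) (acc : List String),
    (PySem.List.enumerate l ((k0 : Nat) : Int)).foldl (fun pred_entities p =>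
      if p.2 == (0 : Int) then pred_entities
      else
        match mrcFindBreak p.2 (PySem.List.enumerate (PySem.List.slice ep (some p.1) none)) with
        | some j => pred_entities ++ [PySem.Str.slice txt (some p.1) (some (p.1 + j + 1))]
        | none => pred_entities) acc
    = acc ++ specList ep txt l k0 := by
  intro l
  induction l with
  | nil => intro k0 acc; simp [PySem.List.enumerate_nil, specList]
  | cons s rest ih =>
    intro k0 acc
    rw [PySem.List.enumerate_cons]
    simp only [List.foldl_cons]
    rw [show ((k0 : Nat) : Int) + 1 = (((k0 + 1 : Nat)) : Int) by push_cast; ring]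
    rw [ih (k0 + 1), aStep ep txt acc k0 s]
    simp [specList]

lemma mrc_decode_eq_specList (sp ep : List Int) (txt : String) :
    mrc_decode sp ep txt = specList ep txt sp 0 := by
  unfold mrc_decode
  have h := aFold ep txt sp 0 []
  simpa using h

-- dictionary invariant for B's sweep: nearest[t] is the first index ≥ i holding t in end_pred
def Dinv (ep : List Int) (d : PySem.Dict Int Int) (i : Nat) : Prop :=
  ∀ t, d.get? t = (ffind t (ep.drop i)).map (fun j => ((i + j : Nat) : Int))

lemma Dinv_step (ep : List Int) (d : PySem.Dict Int Int) (i : Nat) (h : Dinv ep d (i + 1)) :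
    Dinv ep (if ((i : Nat) : Int) < PySem.List.len ep
             then d.insert (PySem.List.pyGetD ep ((i : Nat) : Int) 0) ((i : Nat) : Int) else d) i := by
  by_cases hm : ((i : Nat) : Int) < PySem.List.len ep
  · have hm' : ((i : Nat) : Int) < (ep.length : Int) := by rw [PySem.List.len_eq] at hm; exact hm
    have hlt : i < ep.length := by exact_mod_cast hm'
    rw [if_pos hm]
    intro t
    rw [PySem.List.pyGetD_eq_getElem ep 0 (Int.natCast_nonneg i) hm']
    have hdrop : ep.drop i = ep[i] :: ep.drop (i + 1) := List.drop_eq_getElem_cons hlt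
    rw [PySem.Dict.get?_insert, hdrop]
    simp only [Int.toNat_natCast]
    by_cases ht : t = ep[i]
    · simp [ffind, ht]
    · rw [if_neg ht]
      simp only [ffind, if_neg ht]
      rw [h t]
      cases hf : ffind t (ep.drop (i + 1)) with
      | none => simp
      | some j =>
        simp only [Option.map_some]
        congr 1
        omega
  · rw [if_neg hm]
    intro t
    have hge : ep.length ≤ i := by
      have : (ep.length : Int) ≤ (i : Int) := by simpa [PySem.List.len_eq] using not_lt.mp hm
      exact_mod_cast this
    rw [h t]
    rw [List.drop_eq_nil_of_le hge, List.drop_eq_nil_of_le (by omega)]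
    rfl

lemma bStep (sp ep : List Int) (txt : String) (d : PySem.Dict Int Int) (i : Nat) (out : List String)
    (hd : Dinv ep d i) :
    (if ((i : Nat) : Int) < PySem.List.len sp then
       if (PySem.List.pyGetD sp ((i : Nat) : Int) 0) != 0 && d.contains (PySem.List.pyGetD sp ((i : Nat) : Int) 0) then
         (d, out ++ [PySem.Str.slice txt (some ((i : Nat) : Int)) (some (d.getD (PySem.List.pyGetD sp ((i : Nat) : Int) 0) 0 + 1))])
       else (d, out)
     else (d, out))
    = (d, out ++ emitB sp ep txt i) := by
  unfold emitB
  by_cases hn : ((i : Nat) : Int) < PySem.List.len sp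
  · have hn' : ((i : Nat) : Int) < (sp.length : Int) := by simpa [PySem.List.len_eq] using hn
    rw [if_pos hn, if_pos hn']
    have hs : PySem.List.pyGetD sp ((i : Nat) : Int) 0 = sp.getD i 0 := by
      simp [PySem.List.pyGetD_natCast]
    rw [hs]
    set s := sp.getD i 0 with hsdef
    unfold emitE
    by_cases h0 : s = 0
    · simp [h0]
    · rw [if_neg h0]
      cases hf : ffind s (ep.drop i) with
      | none =>
        have : d.get? s = none := by rw [hd s, hf]; rfl
        have hc : d.contains s = false := (PySem.Dict.get?_eq_none_iff_contains d s).mp this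
        simp [hc]
      | some j =>
        have hg : d.get? s = some ((i + j : Nat) : Int) := by rw [hd s, hf]; rfl
        have hc : d.contains s = true := by
          by_contra hcf
          have hcf' : d.contains s = false := by revert hcf; cases d.contains s <;> simp
          rw [(PySem.Dict.get?_eq_none_iff_contains d s).mpr hcf'] at hg
          simp at hg
        have hgd : d.getD s 0 = ((i + j : Nat) : Int) := by
          rw [PySem.Dict.getD_eq_get?_getD, hg]; rfl
        rw [if_pos (show (s != 0 && d.contains s) = true by simp [hc, h0]), hgd]
        have hcast : ((i + j : Nat) : Int) + 1 = ((i : Nat) : Int) + ((j : Nat) : Int) + 1 := by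
          push_cast; ring
        rw [hcast]
  · have hn' : ¬ ((i : Nat) : Int) < (sp.length : Int) := by rw [PySem.List.len_eq] at hn; exact hn
    rw [if_neg hn, if_neg hn']
    simp

lemma bBody (sp ep : List Int) (txt : String) (d : PySem.Dict Int Int) (i : Nat) (out : List String)
    (h : Dinv ep d (i + 1)) :
    ∃ d', Dinv ep d' i ∧
      (let st := if ((i : Nat) : Int) < (PySem.List.len ep)
                 then ((d, out).1.insert (PySem.List.pyGetD ep ((i : Nat) : Int) 0) ((i : Nat) : Int), (d, out).2)
                 else (d, out)
       if ((i : Nat) : Int) < (PySem.List.len sp) then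
         let s := PySem.List.pyGetD sp ((i : Nat) : Int) 0
         if s != 0 && st.1.contains s then
           (st.1, st.2 ++ [PySem.Str.slice txt (some ((i : Nat) : Int)) (some (st.1.getD s 0 + 1))])
         else st
       else st)
      = (d', out ++ emitB sp ep txt i) := by
  refine ⟨_, Dinv_step ep d i h, ?_⟩
  by_cases hm : ((i : Nat) : Int) < PySem.List.len ep
  · simp only [if_pos hm]
    exact bStep sp ep txt _ i out
      (by have h2 := Dinv_step ep d i h; rwa [if_pos hm] at h2)
  · simp only [if_neg hm]
    exact bStep sp ep txt d i out
      (by have h2 := Dinv_step ep d i h; rwa [if_neg hm] at h2)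

lemma bFold (sp ep : List Int) (txt : String) : ∀ (i : Nat) (d : PySem.Dict Int Int) (out : List String),
    Dinv ep d i →
    ((PySem.List.pyRange ((i : Int) - 1) (-1) (-1)).foldl
      (fun st k =>
        let st := if k < (PySem.List.len ep) then (st.1.insert (PySem.List.pyGetD ep k 0) k, st.2) else st
        if k < (PySem.List.len sp) then
          let s := PySem.List.pyGetD sp k 0
          if s != 0 && st.1.contains s then
            (st.1, st.2 ++ [PySem.Str.slice txt (some k) (some (st.1.getD s 0 + 1))])
          else st
        else st) (d, out)).2
    = out ++ (List.range i).reverse.flatMap (emitB sp ep txt) := by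
  intro i
  induction i with
  | zero =>
    intro d out _
    rw [PySem.List.pyRange_neg_one_eq_nil (by norm_num)]
    simp
  | succ i ih =>
    intro d out hinv
    rw [show ((i + 1 : Nat) : Int) - 1 = ((i : Nat) : Int) by push_cast; ring]
    rw [PySem.List.pyRange_neg_one_cons (show (-1 : Int) < ((i : Nat) : Int) by omega)]
    rw [List.foldl_cons]
    obtain ⟨d', hd', hbody⟩ := bBody sp ep txt d i out hinv
    rw [hbody, ih d' (out ++ emitB sp ep txt i) hd']
    rw [List.range_succ, List.reverse_append]
    simp [List.append_assoc]

-- each per-index emission is [] or a singleton, so reversing it is a no-op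
lemma emitB_reverse (sp ep : List Int) (txt : String) (k : Nat) :
    (emitB sp ep txt k).reverse = emitB sp ep txt k := by
  unfold emitB emitE
  split_ifs with h1 h2
  · simp
  · cases ffind (sp.getD k 0) (ep.drop k) <;> simp
  · simp

lemma flatMap_congr' {α β : Type} (l : List α) (f g : α → List β) (h : ∀ a ∈ l, f a = g a) :
    l.flatMap f = l.flatMap g := by
  induction l with
  | nil => rfl
  | cons x xs ih =>
    simp only [List.flatMap_cons]
    rw [h x (List.mem_cons_self), ih (fun a ha => h a (List.mem_cons_of_mem x ha))]

lemma alt_eq_flatMap (sp ep : List Int) (txt : String) :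
    mrc_decode_alt sp ep txt
      = (List.range (max sp.length ep.length)).flatMap (emitB sp ep txt) := by
  unfold mrc_decode_alt
  dsimp only
  have hmax : max (PySem.List.len sp) (PySem.List.len ep) - 1
      = ((max sp.length ep.length : Nat) : Int) - 1 := by
    simp [PySem.List.len_eq, Nat.cast_max]
  rw [hmax]
  have hinv : Dinv ep PySem.Dict.empty (max sp.length ep.length) := by
    intro t
    rw [List.drop_eq_nil_of_le (le_max_right _ _)]
    simp [PySem.Dict.get?_empty, ffind]
  rw [bFold sp ep txt (max sp.length ep.length) PySem.Dict.empty [] hinv]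
  rw [List.nil_append, List.reverse_flatMap, List.reverse_reverse]
  exact flatMap_congr' _ _ _ (fun a _ => emitB_reverse sp ep txt a)

lemma specList_eq (ep : List Int) (txt : String) : ∀ (l : List Int) (k0 : Nat),
    specList ep txt l k0
      = (List.range l.length).flatMap (fun r => emitE ep txt (k0 + r) (l.getD r 0)) := by
  intro l
  induction l with
  | nil => intro k0; simp [specList]
  | cons s rest ih =>
    intro k0
    simp only [specList, List.length_cons, List.range_succ_eq_map, List.flatMap_cons,
      List.flatMap_map]
    rw [ih (k0 + 1)]
    simp only [Nat.add_zero, List.getD_cons_zero]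
    congr 1
    apply flatMap_congr'
    intro r _
    rw [show k0 + (r + 1) = (k0 + 1) + r by omega]
    simp

lemma flatMap_range_split (sp ep : List Int) (txt : String) :
    (List.range (max sp.length ep.length)).flatMap (emitB sp ep txt)
      = (List.range sp.length).flatMap (emitB sp ep txt) := by
  rw [show max sp.length ep.length = sp.length + (max sp.length ep.length - sp.length) by omega]
  rw [List.range_add, List.flatMap_append, List.flatMap_map]
  have hnil : ∀ r ∈ List.range (max sp.length ep.length - sp.length),
      (fun a => emitB sp ep txt (sp.length + a)) r = (fun _ => ([] : List String)) r := by
    intro r _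
    show emitB sp ep txt (sp.length + r) = []
    unfold emitB
    rw [if_neg (by push_cast; omega)]
  rw [flatMap_congr' (List.range (max sp.length ep.length - sp.length))
      (fun a => emitB sp ep txt (sp.length + a)) (fun _ => ([] : List String)) hnil]
  simp

theorem mrc_decode_spec : Claim_equal_mrc_decode := by
  unfold Claim_equal_mrc_decode
  intro sp ep txt _
  unfold Spec_mrc_decode
  rw [mrc_decode_eq_specList, alt_eq_flatMap, flatMap_range_split, specList_eq]
  apply flatMap_congr'
  intro r hr
  have hr' : r < sp.length := List.mem_range.mp hr
  unfold emitB
  rw [if_pos (by exact_mod_cast hr'), Nat.zero_add]
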